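-- pv_equiv track=rewrite | github.com/Eszkis/homework | model/accountNumber/accountNumber.py | separate_line_number_to_number_list
-- ===== SOURCE A (Python) =====
-- def separate_line_number_to_number_list(raw_data_lines):
--     account_numbers = []
--     for line_index in range(len(raw_data_lines) // 4):
--         numbers = []
--         for index in range(9):
--             number_lines = []
--             for line_count in range(1, 4):
--                 number_lines.append(raw_data_lines[line_count + line_index * 4][0 + index * 3:3 + index * 3])
--             numbers.append(number_lines)
--         account_numbers.append(numbers)
--     return account_numbers
-- ===== SOURCE B (Python) =====
-- def separate_line_number_to_number_list(raw_data_lines):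
--     # single pass over the lines with a small state machine: every group of 4
--     # lines, the header line (row 0) resets 9 empty cells, each of the 3
--     # content lines is consumed 3 characters at a time into the cells, and a
--     # completed group flushes its cells as one account.
--     accounts = []
--     cells = []
--     row = 0
--     for line in raw_data_lines:
--         if row == 0:
--             cells = [[] for _ in range(9)]
--         else:
--             rest = line
--             for cell in cells:
--                 cell.append(rest[:3])
--                 rest = rest[3:]
--         row += 1
--         if row == 4:
--             accounts.append(cells)
--             row = 0
--     return accounts
-- ===== Notes on version B (the rewrite author's own statement) =====
-- stated objective: alternative
-- what changed: B replaces A's three nested index loops (group index, digit index, row index with slice arithmetic) by a single pass over the lines with a row-mod-4 state machine that fills 9 accumulating cells by consuming each content line 3 characters at a time and flushes a completed group.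
import Mathlib
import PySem

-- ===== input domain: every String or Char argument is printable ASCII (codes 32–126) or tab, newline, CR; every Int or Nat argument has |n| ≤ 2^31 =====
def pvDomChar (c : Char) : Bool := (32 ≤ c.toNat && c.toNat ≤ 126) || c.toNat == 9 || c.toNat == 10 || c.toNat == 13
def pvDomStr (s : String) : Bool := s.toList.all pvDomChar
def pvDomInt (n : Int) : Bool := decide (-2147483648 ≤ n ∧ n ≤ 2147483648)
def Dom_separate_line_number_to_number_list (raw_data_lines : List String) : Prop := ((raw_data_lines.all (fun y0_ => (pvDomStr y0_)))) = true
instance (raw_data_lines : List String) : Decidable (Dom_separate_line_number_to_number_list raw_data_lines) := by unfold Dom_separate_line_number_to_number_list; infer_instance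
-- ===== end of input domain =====

-- B replaces A's three nested index loops by a single pass over the lines with a
-- row-mod-4 state machine that fills 9 accumulating cells by consuming each content
-- line 3 characters at a time and flushes each completed group of 4 lines.

-- ===== PORT A =====
def separate_line_number_to_number_list (raw_data_lines : List String) : List (List (List String)) :=
  (PySem.List.pyRange 0 (PySem.Int.floordiv (PySem.List.len raw_data_lines) 4) 1).foldl
    (fun account_numbers line_index =>
      account_numbers ++ [
        (PySem.List.pyRange 0 9 1).foldl (fun numbers index =>
          numbers ++ [
            (PySem.List.pyRange 1 4 1).foldl (fun number_lines line_count =>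
              number_lines ++ [PySem.Str.slice
                (PySem.List.pyGetD raw_data_lines (line_count + line_index * 4) "")
                (some (0 + index * 3)) (some (3 + index * 3))]) []]) []]) []

-- ===== PORT B =====
-- the inner 'for cell in cells: cell.append(rest[:3]); rest = rest[3:]' loop
def pvFillRow (cells : List (List String)) (rest : String) : List (List String) :=
  match cells with
  | [] => []
  | cell :: cs =>
      (cell ++ [PySem.Str.slice rest none (some 3)]) :: pvFillRow cs (PySem.Str.slice rest (some 3) none)

-- one iteration of B's loop: state = (accounts, cells, row)
def pvStepB (st : List (List (List String)) × List (List String) × Int) (line : String) :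
    List (List (List String)) × List (List String) × Int :=
  let cells := if st.2.2 == 0 then List.replicate 9 ([] : List String) else pvFillRow st.2.1 line
  let row := st.2.2 + 1
  if row == 4 then (st.1 ++ [cells], cells, 0) else (st.1, cells, row)

def separate_line_number_to_number_list_alt (raw_data_lines : List String) : List (List (List String)) :=
  (raw_data_lines.foldl pvStepB ([], [], 0)).1

-- ===== PRECONDITION & SPEC =====
def Spec_separate_line_number_to_number_list (raw_data_lines : List String) (out : List (List (List String))) : Prop := out = separate_line_number_to_number_list_alt raw_data_lines
instance (raw_data_lines : List String) (out : List (List (List String))) : Decidable (Spec_separate_line_number_to_number_list raw_data_lines out) := by unfold Spec_separate_line_number_to_number_list; infer_instance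

-- ===== CLAIM (what is proved, stated in full; the proofs are below) =====
def Claim_equal_separate_line_number_to_number_list : Prop := ∀ (raw_data_lines : List String), Dom_separate_line_number_to_number_list raw_data_lines → Spec_separate_line_number_to_number_list raw_data_lines (separate_line_number_to_number_list raw_data_lines)

-- ===== LEMMAS AND PROOFS =====

-- canonical value of one digit segment: characters 3i..3i+3 of the line
def pvSeg (s : String) (i : Nat) : String :=
  PySem.Str.slice s (some ((3*i : Nat) : Int)) (some ((3*i+3 : Nat) : Int))

-- canonical value of one account from its three content lines
def pvAcct (b c d : String) : List (List String) :=
  (List.range 9).map (fun i => [pvSeg b i, pvSeg c i, pvSeg d i])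

-- recursive reference: consume 4 lines per account, drop an incomplete tail
def pvRef : List String → List (List (List String))
  | _ :: b :: c :: d :: rest => pvAcct b c d :: pvRef rest
  | _ => []

theorem seg_head (s : String) (j : Nat) :
    PySem.Str.slice (PySem.Str.slice s (some ((3*j : Nat) : Int)) none) none (some 3) = pvSeg s j := by
  apply String.toList_inj.mp
  simp only [pvSeg, PySem.Str.toList_slice, PySem.Chars.slice_eq_listSlice]
  rw [PySem.List.slice_from_natCast, PySem.List.slice_natCast,
    show ((3:Int)) = ((3:Nat):Int) from rfl, PySem.List.slice_to_natCast]
  congr 1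
  omega

theorem seg_drop (s : String) (j : Nat) :
    PySem.Str.slice (PySem.Str.slice s (some ((3*j : Nat) : Int)) none) (some 3) none
      = PySem.Str.slice s (some ((3*(j+1) : Nat) : Int)) none := by
  apply String.toList_inj.mp
  simp only [PySem.Str.toList_slice, PySem.Chars.slice_eq_listSlice]
  rw [show ((3:Int)) = ((3:Nat):Int) from rfl,
    PySem.List.slice_from_natCast, PySem.List.slice_from_natCast, PySem.List.slice_from_natCast,
    List.drop_drop]
  congr 1

theorem fillRow_zipIdx (cells : List (List String)) (s : String) (j : Nat) :
    pvFillRow cells (PySem.Str.slice s (some ((3*j : Nat) : Int)) none)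
      = (cells.zipIdx j).map (fun ci => ci.1 ++ [pvSeg s ci.2]) := by
  induction cells generalizing j with
  | nil => simp [pvFillRow]
  | cons cell cs ih =>
      rw [pvFillRow, seg_head, seg_drop, ih (j+1), List.zipIdx_cons, List.map_cons]

theorem fillRow_eq (cells : List (List String)) (s : String) :
    pvFillRow cells s = (cells.zipIdx).map (fun ci => ci.1 ++ [pvSeg s ci.2]) := by
  have h0 : s = PySem.Str.slice s (some ((3*0 : Nat) : Int)) none := by
    apply String.toList_inj.mp
    simp only [PySem.Str.toList_slice, PySem.Chars.slice_eq_listSlice]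
    rw [PySem.List.slice_from_natCast]
    simp
  calc pvFillRow cells s = pvFillRow cells (PySem.Str.slice s (some ((3*0 : Nat) : Int)) none) := by rw [← h0]
    _ = _ := fillRow_zipIdx cells s 0

theorem cells_val (b c d : String) :
    pvFillRow (pvFillRow (pvFillRow (List.replicate 9 ([] : List String)) b) c) d = pvAcct b c d := by
  simp only [fillRow_eq, List.replicate, List.zipIdx, List.map_cons, List.map_nil,
    pvAcct, List.range_succ]
  norm_num

theorem B_eq_ref (xs : List String) (acc : List (List (List String))) (cells : List (List String)) :
    (xs.foldl pvStepB (acc, cells, 0)).1 = acc ++ pvRef xs := by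
  induction xs using pvRef.induct generalizing acc cells with
  | case1 a b c d rest ih =>
      show ((rest.foldl pvStepB (pvStepB (pvStepB (pvStepB (pvStepB (acc, cells, 0) a) b) c) d))).1 = _
      simp only [pvStepB, beq_iff_eq]
      norm_num
      rw [ih, cells_val, pvRef, List.append_assoc, List.singleton_append]
  | case2 x h =>
      match x, h with
      | [], _ => simp [pvRef]
      | [a], _ => simp [pvRef, pvStepB]
      | [a,b], _ => simp [pvRef, pvStepB]
      | [a,b,c], _ => simp [pvRef, pvStepB]
      | a::b::c::d::r, h => exact absurd rfl (h a b c d r)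

theorem pyRange9 : PySem.List.pyRange 0 9 1 = [0,1,2,3,4,5,6,7,8] := by decide

theorem pyRange13 : PySem.List.pyRange 1 4 1 = [1,2,3] := by decide

-- one account group of A equals the canonical account value
theorem acctA_eq (xs : List String) (k : Nat) :
    (PySem.List.pyRange 0 9 1).foldl (fun numbers index =>
        numbers ++ [
          (PySem.List.pyRange 1 4 1).foldl (fun number_lines line_count =>
            number_lines ++ [PySem.Str.slice
              (PySem.List.pyGetD xs (line_count + (0 + (k:Int)) * 4) "")
              (some (0 + index * 3)) (some (3 + index * 3))]) []]) []
      = pvAcct (xs.getD (4*k+1) "") (xs.getD (4*k+2) "") (xs.getD (4*k+3) "") := by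
  have g1 : (1 + (0+(k:Int)) * 4) = ((4*k+1 : Nat) : Int) := by push_cast; ring
  have g2 : (2 + (0+(k:Int)) * 4) = ((4*k+2 : Nat) : Int) := by push_cast; ring
  have g3 : (3 + (0+(k:Int)) * 4) = ((4*k+3 : Nat) : Int) := by push_cast; ring
  simp only [pyRange9, pyRange13, List.foldl_cons, List.foldl_nil, g1, g2, g3,
    PySem.List.pyGetD_natCast, pvAcct, List.range_succ, List.map_append, List.map_cons,
    List.map_nil, pvSeg]
  norm_num

-- A in closed map form
theorem A_norm (xs : List String) :
    separate_line_number_to_number_list xs =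
      (List.range (xs.length / 4)).map (fun k =>
        pvAcct (xs.getD (4*k+1) "") (xs.getD (4*k+2) "") (xs.getD (4*k+3) "")) := by
  unfold separate_line_number_to_number_list
  have hq : PySem.Int.floordiv (PySem.List.len xs) 4 = ((xs.length/4 : Nat) : Int) := by
    simp [PySem.Int.floordiv, Int.fdiv_eq_ediv, PySem.List.len]
  rw [hq, PySem.List.pyRange_one 0 ((xs.length/4 : Nat) : Int), show (((xs.length/4 : Nat) : Int) - 0).toNat = xs.length/4 from by omega,
    List.foldl_map, PySem.List.foldl_append_singleton_eq_map, List.nil_append]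
  exact List.map_congr_left (fun k _ => acctA_eq xs k)

theorem A_eq_ref (xs : List String) : separate_line_number_to_number_list xs = pvRef xs := by
  induction xs using pvRef.induct with
  | case1 a b c d rest ih =>
      rw [A_norm] at ih ⊢
      have hl : (a::b::c::d::rest).length / 4 = rest.length / 4 + 1 := by simp; omega
      rw [hl, List.range_succ_eq_map, List.map_cons, List.map_map, pvRef, ← ih]
      refine congrArg₂ _ ?_ ?_
      · simp [List.getD]
      apply List.map_congr_left
      intro k _
      have e1 : 4*(k+1)+1 = (4*k+1)+4 := by omega
      have e2 : 4*(k+1)+2 = (4*k+2)+4 := by omega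
      have e3 : 4*(k+1)+3 = (4*k+3)+4 := by omega
      simp only [Function.comp_apply, Nat.succ_eq_add_one, e1, e2, e3]
      rfl
  | case2 x h =>
      match x, h with
      | [], _ => rw [A_norm]; simp [pvRef]
      | [a], _ => rw [A_norm]; simp [pvRef]
      | [a,b], _ => rw [A_norm]; simp [pvRef]
      | [a,b,c], _ => rw [A_norm]; simp [pvRef]
      | a::b::c::d::r, h => exact absurd rfl (h a b c d r)

-- ===== VERDICT (by name: the statement is the Claim_ definition above) =====
theorem separate_line_number_to_number_list_spec : Claim_equal_separate_line_number_to_number_list := by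
  intro xs _
  show _ = _
  rw [A_eq_ref, separate_line_number_to_number_list_alt, B_eq_ref, List.nil_append]
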